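-- pv_equiv track=rewrite | github.com/ttaiv/taylor-bracelet-optimizer | find_bracelet_texts_recursive.py | update_remaining_letters
-- ===== SOURCE A (Python) =====
-- from collections import Counter
--
-- def update_remaining_letters(
--     chosen_string: str, letter_counts: tuple[int, ...]
-- ) -> tuple[int, ...]:
--     """
--     Forms chosen string using the given letter pool and returns the updated letter pool.
--     Assumes that the chosen string can be formed with the given letter counts.
--
--     Args:
--         chosen_string (str): The string to form.
--         letter_counts (tuple[int, ...]): A tuple of letter counts. The index of the tuple
--             corresponds to the letter's position in the alphabet, starting from 'A' at index 0.
--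
--     Returns:
--         tuple[int, ...]: The updated letter counts after forming the chosen string.
--     """
--     # Calculate letter counts in input string.
--     input_letter_counts: dict[str, int] = Counter(chosen_string)
--     # Update letter counts.
--     new_letter_counts: list[int] = list(letter_counts)
--     for letter, count in input_letter_counts.items():
--         new_letter_counts[ord(letter) - ord("A")] -= count
--
--     return tuple(new_letter_counts)
-- ===== SOURCE B (Python) =====
-- def update_remaining_letters(
--     chosen_string: str, letter_counts: tuple[int, ...]
-- ) -> tuple[int, ...]:
--     """Sort the characters, then scan runs of equal letters and subtract run lengths."""
--     new_letter_counts = list(letter_counts)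
--     ordered = sorted(chosen_string)
--     i = 0
--     while i < len(ordered):
--         j = i
--         while j < len(ordered) and ordered[j] == ordered[i]:
--             j += 1
--         new_letter_counts[ord(ordered[i]) - ord("A")] -= j - i
--         i = j
--     return tuple(new_letter_counts)
-- ===== Notes on version B (the rewrite author's own statement) =====
-- stated objective: alternative
-- what changed: B replaces A's hash-based aggregation (Counter, then one subtraction per distinct letter in first-occurrence order) by sort-then-scan: it sorts the characters and scans runs of equal letters, subtracting each run's length; correctness relies on the per-cell subtractions commuting.
import Mathlib
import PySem

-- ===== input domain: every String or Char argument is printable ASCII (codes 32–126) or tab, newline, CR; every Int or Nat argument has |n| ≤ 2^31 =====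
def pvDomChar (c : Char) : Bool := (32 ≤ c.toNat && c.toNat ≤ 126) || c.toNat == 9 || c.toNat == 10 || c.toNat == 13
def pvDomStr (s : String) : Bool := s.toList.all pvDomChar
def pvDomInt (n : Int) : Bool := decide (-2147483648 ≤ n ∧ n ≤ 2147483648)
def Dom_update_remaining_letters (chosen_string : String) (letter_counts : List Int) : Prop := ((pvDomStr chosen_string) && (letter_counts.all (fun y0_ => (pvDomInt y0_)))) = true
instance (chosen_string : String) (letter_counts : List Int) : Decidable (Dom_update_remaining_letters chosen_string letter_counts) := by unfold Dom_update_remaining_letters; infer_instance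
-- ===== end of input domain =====

-- B replaces A's Counter-based aggregation by sort-then-scan: it sorts the characters
-- and subtracts one run length per run of equal letters (objective: alternative).

-- ===== PORT A =====
def update_remaining_letters (chosen_string : String) (letter_counts : List Int) : List Int :=
  -- input_letter_counts = Counter(chosen_string)
  let input_letter_counts : PySem.Dict Char Int := PySem.Dict.counter chosen_string.toList
  -- for letter, count in input_letter_counts.items(): new[ord(letter)-ord('A')] -= count
  input_letter_counts.items.foldl
    (fun new_letter_counts p =>
      PySem.List.pySetD new_letter_counts ((p.1.toNat : Int) - 65)
        (PySem.List.pyGetD new_letter_counts ((p.1.toNat : Int) - 65) 0 - p.2))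
    letter_counts

-- ===== PORT B =====
-- the inner `while j < len(ordered) and ordered[j] == ordered[i]` scan together with the
-- outer while loop: groups the (sorted) character list into runs (char, run length)
def runsAux : Char → Int → List Char → List (Char × Int)
  | c, k, [] => [(c, k)]
  | c, k, d :: rest => if d = c then runsAux c (k + 1) rest else (c, k) :: runsAux d 1 rest

def runs : List Char → List (Char × Int)
  | [] => []
  | c :: rest => runsAux c 1 rest

def update_remaining_letters_alt (chosen_string : String) (letter_counts : List Int) : List Int :=
  -- ordered = sorted(chosen_string); per run: new[ord(run char) - ord('A')] -= run length
  (runs (PySem.List.sorted chosen_string.toList (fun c => c) false)).foldl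
    (fun new_letter_counts p =>
      PySem.List.pySetD new_letter_counts ((p.1.toNat : Int) - 65)
        (PySem.List.pyGetD new_letter_counts ((p.1.toNat : Int) - 65) 0 - p.2))
    letter_counts

-- ===== PRECONDITION & SPEC =====
-- Pre_ excludes exactly the inputs on which A raises IndexError: some character's index
-- ord(c) - ord('A') falls outside the valid (Python, possibly negative) index range of the pool.
def Pre_update_remaining_letters (chosen_string : String) (letter_counts : List Int) : Prop :=
  (chosen_string.toList.all (fun c =>
    decide (-(letter_counts.length : Int) ≤ (c.toNat : Int) - 65) &&
    decide ((c.toNat : Int) - 65 < letter_counts.length))) = true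
instance (chosen_string : String) (letter_counts : List Int) : Decidable (Pre_update_remaining_letters chosen_string letter_counts) := by unfold Pre_update_remaining_letters; infer_instance

def pvWitness_update_remaining_letters : String × List Int := ("A", [1])

def Spec_update_remaining_letters (chosen_string : String) (letter_counts : List Int) (out : List Int) : Prop := out = update_remaining_letters_alt chosen_string letter_counts
instance (chosen_string : String) (letter_counts : List Int) (out : List Int) : Decidable (Spec_update_remaining_letters chosen_string letter_counts out) := by unfold Spec_update_remaining_letters; infer_instance

-- ===== CLAIM (what is proved, stated in full; the proofs are below) =====
def Claim_equal_update_remaining_letters : Prop := ∀ (chosen_string : String) (letter_counts : List Int), Dom_update_remaining_letters chosen_string letter_counts → Pre_update_remaining_letters chosen_string letter_counts → Spec_update_remaining_letters chosen_string letter_counts (update_remaining_letters chosen_string letter_counts)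

-- ===== LEMMAS AND PROOFS =====

-- The normalized (wrapped) nonnegative index of character c in a pool of length n.
def nIdx (n : Nat) (c : Char) : Nat :=
  (PySem.List.pyIdx? n ((c.toNat : Int) - 65)).getD 0

lemma pyIdx_eq_nIdx (n : Nat) (c : Char)
    (h : PySem.Raise.InRange n ((c.toNat : Int) - 65)) :
    PySem.List.pyIdx? n ((c.toNat : Int) - 65) = some (nIdx n c) ∧ nIdx n c < n := by
  obtain ⟨h1, h2⟩ := h
  unfold nIdx PySem.List.pyIdx?
  split_ifs with ha hb hc <;> simp_all <;> omega

-- the shared per-operation update step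
def step (a : List Int) (p : Char × Int) : List Int :=
  PySem.List.pySetD a ((p.1.toNat : Int) - 65)
    (PySem.List.pyGetD a ((p.1.toNat : Int) - 65) 0 - p.2)

lemma step_eq_set (a : List Int) (p : Char × Int)
    (h : PySem.Raise.InRange a.length ((p.1.toNat : Int) - 65)) :
    step a p = a.set (nIdx a.length p.1) (a.getD (nIdx a.length p.1) 0 - p.2) := by
  obtain ⟨he, hlt⟩ := pyIdx_eq_nIdx a.length p.1 h
  simp [step, PySem.List.pySetD, PySem.List.pySet?, PySem.List.pyGetD, PySem.List.pyGet?, he,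
    List.getD_eq_getElem?_getD]

-- Main invariant of the subtraction fold: length is preserved and entry j loses
-- the total weight of all operations targeting j.
lemma fold_step (ops : List (Char × Int)) (acc : List Int)
    (h : ∀ p ∈ ops, PySem.Raise.InRange acc.length ((p.1.toNat : Int) - 65)) :
    (ops.foldl step acc).length = acc.length ∧
    ∀ j : Nat, (ops.foldl step acc).getD j 0 =
      acc.getD j 0 -
        ((ops.filter (fun p => nIdx acc.length p.1 == j)).map (·.2)).sum := by
  induction ops generalizing acc with
  | nil => simp
  | cons p rest ih =>
    have hp := h p (List.mem_cons_self ..)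
    have hset := step_eq_set acc p hp
    set k := nIdx acc.length p.1 with hk
    have hklt : k < acc.length := (pyIdx_eq_nIdx acc.length p.1 hp).2
    have hlen : (step acc p).length = acc.length := by
      rw [hset]; simp
    have hrest : ∀ q ∈ rest, PySem.Raise.InRange (step acc p).length ((q.1.toNat : Int) - 65) := by
      intro q hq; rw [hlen]; exact h q (List.mem_cons_of_mem _ hq)
    obtain ⟨ihlen, ihget⟩ := ih (step acc p) hrest
    constructor
    · simpa [hlen] using ihlen
    · intro j
      have hget := ihget j
      simp only [List.foldl_cons] at *
      rw [hget, hlen]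
      have hjset : (step acc p).getD j 0 =
          if j = k then acc.getD k 0 - p.2 else acc.getD j 0 := by
        rw [hset]
        by_cases hj : j = k
        · subst hj; simp [List.getD_eq_getElem?_getD, hklt]
        · rw [List.getD_eq_getElem?_getD, List.getD_eq_getElem?_getD, List.getElem?_set_ne (by omega)]
          simp [hj, List.getD_eq_getElem?_getD]
      rw [hjset]
      by_cases hj : j = k
      · subst hj
        simp only [List.filter_cons, ← hk, beq_self_eq_true, if_true, List.map_cons,
          List.sum_cons]
        ring
      · have : (nIdx acc.length p.1 == j) = false := by
          simp [← hk]; exact fun hc => hj hc.symm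
        simp [this, hj]

-- Every run character of runsAux comes from the seed or the scanned tail.
lemma mem_runsAux (rest : List Char) (c : Char) (k : Int) (p : Char × Int)
    (hp : p ∈ runsAux c k rest) : p.1 = c ∨ p.1 ∈ rest := by
  induction rest generalizing c k with
  | nil => simp [runsAux] at hp; simp [hp]
  | cons d rest ih =>
    simp only [runsAux] at hp
    split_ifs at hp with hd
    · rcases ih _ _ hp with h | h
      · left; exact h
      · right; exact List.mem_cons_of_mem _ h
    · rcases List.mem_cons.mp hp with h | h
      · left; rw [h]
      · rcases ih _ _ h with h' | h'
        · right; rw [h']; exact List.mem_cons_self ..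
        · right; exact List.mem_cons_of_mem _ h'

lemma mem_runs (l : List Char) (p : Char × Int) (hp : p ∈ runs l) : p.1 ∈ l := by
  cases l with
  | nil => simp [runs] at hp
  | cons c rest =>
    rcases mem_runsAux rest c 1 p hp with h | h
    · rw [h]; exact List.mem_cons_self ..
    · exact List.mem_cons_of_mem _ h

-- Total weight of the runs whose character satisfies q = number of characters satisfying q.
lemma runsAux_filter_sum (rest : List Char) (c : Char) (k : Int) (q : Char → Bool) :
    (((runsAux c k rest).filter (fun p => q p.1)).map (·.2)).sum
      = (if q c then k else 0) + (rest.countP q : Int) := by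
  induction rest generalizing c k with
  | nil => by_cases h : q c <;> simp [runsAux, h]
  | cons d rest ih =>
    by_cases hd : d = c
    · subst hd
      simp only [runsAux, if_true]
      rw [ih, List.countP_cons]
      by_cases h : q d <;> simp [h] <;> push_cast <;> ring
    · simp only [runsAux, if_neg hd, List.filter_cons, List.countP_cons]
      by_cases h : q c <;> by_cases h2 : q d <;>
        simp [h, h2, ih] <;> push_cast <;> ring

lemma runs_filter_sum (l : List Char) (q : Char → Bool) :
    (((runs l).filter (fun p => q p.1)).map (·.2)).sum = (l.countP q : Int) := by
  cases l with
  | nil => simp [runs]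
  | cons c rest =>
    rw [runs, runsAux_filter_sum, List.countP_cons]
    by_cases h : q c <;> simp [h] <;> ring

-- PySem's first-occurrence dedup is a permutation of Mathlib's dedup.
lemma pysem_dedup_perm (l : List Char) : (PySem.List.dedup l).Perm l.dedup := by
  apply List.perm_of_nodup_nodup_toFinset_eq (PySem.List.nodup_dedup l) (List.nodup_dedup l)
  ext x
  simp

-- Aggregated counts over distinct letters hitting index j = raw number of characters hitting j.
lemma counts_eq_raw (cs : List Char) (q : Char → Bool) :
    ((((PySem.List.dedup cs).filter q).map (fun c => (cs.count c : Int))).sum)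
      = (cs.countP q : Int) := by
  have hperm : (((PySem.List.dedup cs).filter q).map cs.count).Perm
      ((cs.dedup.filter q).map cs.count) :=
    ((pysem_dedup_perm cs).filter q).map cs.count
  have hnat : (((PySem.List.dedup cs).filter q).map cs.count).sum = cs.countP q := by
    rw [hperm.sum_eq]; exact List.sum_map_count_dedup_filter_eq_countP q cs
  calc ((((PySem.List.dedup cs).filter q).map (fun c => (cs.count c : Int))).sum)
      = ((((PySem.List.dedup cs).filter q).map cs.count).map (fun n : Nat => (n : Int))).sum := by
        rw [List.map_map]; rfl
    _ = ((((PySem.List.dedup cs).filter q).map cs.count).sum : Int) := by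
        rw [Nat.cast_list_sum]
    _ = (cs.countP q : Int) := by rw [hnat]

-- ===== VERDICT (by name: the statement is the Claim_ definition above) =====
theorem update_remaining_letters_spec : Claim_equal_update_remaining_letters := by
  intro s lc _ hpre0
  have hpre : ∀ c ∈ s.toList, PySem.Raise.InRange lc.length ((c.toNat : Int) - 65) := by
    intro c hc
    have h := List.all_eq_true.mp hpre0 c hc
    simp only [Bool.and_eq_true, decide_eq_true_eq] at h
    exact ⟨h.1, h.2⟩
  unfold Spec_update_remaining_letters update_remaining_letters update_remaining_letters_alt
  set cs := s.toList with hcs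
  -- A's fold over Counter items, as a fold of `step`
  have hA : (PySem.Dict.counter cs).items.foldl
      (fun a p => PySem.List.pySetD a ((p.1.toNat : Int) - 65)
        (PySem.List.pyGetD a ((p.1.toNat : Int) - 65) 0 - p.2)) lc
      = ((PySem.List.dedup cs).map (fun k => (k, (cs.count k : Int)))).foldl step lc := by
    rw [PySem.Dict.items_counter]
    simp only [PySem.List.dedup_eq_ofList]
    rfl
  -- B's fold over the runs of the sorted characters, as a fold of `step`
  have hB : (runs (PySem.List.sorted cs (fun c => c) false)).foldl
      (fun a p => PySem.List.pySetD a ((p.1.toNat : Int) - 65)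
        (PySem.List.pyGetD a ((p.1.toNat : Int) - 65) 0 - p.2)) lc
      = (runs (PySem.List.sorted cs (fun c => c) false)).foldl step lc := rfl
  rw [hA, hB]
  have hsortperm : (PySem.List.sorted cs (fun c => c) false).Perm cs :=
    PySem.List.sorted_perm cs (fun c => c) false
  have hAok : ∀ p ∈ (PySem.List.dedup cs).map (fun k => (k, (cs.count k : Int))),
      PySem.Raise.InRange lc.length ((p.1.toNat : Int) - 65) := by
    intro p hp
    obtain ⟨c, hc, rfl⟩ := List.mem_map.mp hp
    exact hpre c ((PySem.List.mem_dedup _ _).mp hc)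
  have hBok : ∀ p ∈ runs (PySem.List.sorted cs (fun c => c) false),
      PySem.Raise.InRange lc.length ((p.1.toNat : Int) - 65) := by
    intro p hp
    exact hpre p.1 (hsortperm.mem_iff.mp (mem_runs _ p hp))
  obtain ⟨hAlen, hAget⟩ := fold_step _ lc hAok
  obtain ⟨hBlen, hBget⟩ := fold_step _ lc hBok
  apply List.ext_getElem (by omega)
  intro j hj1 hj2
  have e1 : (((PySem.List.dedup cs).map (fun k => (k, (cs.count k : Int)))).foldl step lc).getD j 0
      = ((runs (PySem.List.sorted cs (fun c => c) false)).foldl step lc).getD j 0 := by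
    rw [hAget j, hBget j]
    congr 1
    calc (List.map (fun x => x.2) (List.filter (fun p => nIdx lc.length p.1 == j)
            (List.map (fun k => (k, (cs.count k : Int))) (PySem.List.dedup cs)))).sum
        = (cs.countP (fun c => nIdx lc.length c == j) : Int) := by
          simp only [List.filter_map, List.map_map, Function.comp_def]
          exact counts_eq_raw cs (fun c => nIdx lc.length c == j)
      _ = ((PySem.List.sorted cs (fun c => c) false).countP
            (fun c => nIdx lc.length c == j) : Int) := by
          rw [hsortperm.countP_eq]
      _ = (List.map (fun x => x.2) (List.filter (fun p => nIdx lc.length p.1 == j)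
            (runs (PySem.List.sorted cs (fun c => c) false)))).sum :=
          (runs_filter_sum _ _).symm
  have g1 := e1
  rw [List.getD_eq_getElem?_getD, List.getD_eq_getElem?_getD,
    List.getElem?_eq_getElem hj1, List.getElem?_eq_getElem hj2] at g1
  simpa using g1
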